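-- pv_equiv track=rewrite | github.com/dakshguta1511/long-lines | Python/Codechef/chargeParticles.py | calc_dis
-- ===== SOURCE A (Python) =====
-- def calc_dis(arr):
--     dist=0
--     for i in range(len(arr)-1):
--         if arr[i]==arr[i+1]:
--             dist+=2
--         else:
--             dist+=1
--
--     return dist
-- ===== SOURCE B (Python) =====
-- def calc_dis(arr):
--     # Collapse maximal runs of consecutive equal elements into their head
--     # values; with r runs among n elements there are n-r equal adjacent pairs,
--     # so the answer is (n-1) + (n-r) = 2*n - 1 - r (0 for n < 2).
--     if len(arr) < 2:
--         return 0
--     heads = []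
--     for x in arr:
--         if heads and heads[-1] == x:
--             continue
--         heads.append(x)
--     return 2 * len(arr) - 1 - len(heads)
-- ===== Notes on version B (the rewrite author's own statement) =====
-- stated objective: alternative
-- what changed: B groups the array into maximal runs of consecutive equal elements (collecting one head per run) and computes the answer by the closed form 2*n - 1 - runs, instead of A's per-index if/else distance accumulation.
import Mathlib
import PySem

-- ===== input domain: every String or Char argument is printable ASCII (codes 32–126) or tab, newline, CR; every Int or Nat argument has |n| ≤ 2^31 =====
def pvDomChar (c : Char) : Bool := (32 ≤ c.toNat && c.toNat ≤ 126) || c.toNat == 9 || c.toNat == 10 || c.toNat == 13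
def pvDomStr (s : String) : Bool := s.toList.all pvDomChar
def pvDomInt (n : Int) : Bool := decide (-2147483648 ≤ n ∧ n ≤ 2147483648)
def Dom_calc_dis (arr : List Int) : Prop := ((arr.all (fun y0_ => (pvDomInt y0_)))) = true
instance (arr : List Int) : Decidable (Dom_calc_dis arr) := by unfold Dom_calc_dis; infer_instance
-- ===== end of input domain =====

-- B groups the array into maximal runs of consecutive equal elements (one head
-- per run) and returns the closed form 2*n - 1 - runs; A accumulates per index.

-- ===== PORT A =====
-- for i in range(len(arr)-1): dist += 2 if arr[i]==arr[i+1] else 1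
-- (indices i and i+1 are always in range here, so pyGetD is exact for arr[i])
def calc_dis (arr : List Int) : Int :=
  (PySem.List.pyRange 0 ((arr.length : Int) - 1) 1).foldl
    (fun dist i =>
      if PySem.List.pyGetD arr i 0 = PySem.List.pyGetD arr (i + 1) 0 then dist + 2
      else dist + 1)
    0

-- ===== PORT B =====
-- heads collects one representative per maximal run of equal adjacent elements:
-- for x in arr: if heads and heads[-1] == x: continue; heads.append(x)
def calc_dis_alt (arr : List Int) : Int :=
  if arr.length < 2 then 0
  else
    let heads : List Int :=
      arr.foldl (fun hs x => if hs.getLast? = some x then hs else hs ++ [x]) []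
    2 * (arr.length : Int) - 1 - (heads.length : Int)

-- ===== PRECONDITION & SPEC =====
def Spec_calc_dis (arr : List Int) (out : Int) : Prop := out = calc_dis_alt arr
instance (arr : List Int) (out : Int) : Decidable (Spec_calc_dis arr out) := by unfold Spec_calc_dis; infer_instance

-- ===== CLAIM (what is proved, stated in full; the proofs are below) =====
def Claim_equal_calc_dis : Prop := ∀ (arr : List Int), Dom_calc_dis arr → Spec_calc_dis arr (calc_dis arr)

-- ===== LEMMAS AND PROOFS =====

-- the index pairs A reads are exactly the zipped adjacent pairs
theorem pv_pairs_eq (arr : List Int) :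
    (PySem.List.pyRange 0 ((arr.length : Int) - 1) 1).map
      (fun i => (PySem.List.pyGetD arr i 0, PySem.List.pyGetD arr (i + 1) 0))
    = arr.zip arr.tail := by
  apply List.ext_getElem
  · simp [PySem.List.length_pyRange_one]
  · intro k h1 h2
    have hk : k < arr.length - 1 := by
      simpa [PySem.List.length_pyRange_one] using h1
    have hk1 : k + 1 < arr.length := by omega
    simp [PySem.List.getElem_pyRange_one]
    constructor
    · simp [List.getElem?_eq_getElem (show k < arr.length by omega)]
    · have hcast : ((k : Int) + 1) = (((k + 1 : Nat)) : Int) := by push_cast; ring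
      rw [hcast, PySem.List.pyGetD_natCast]
      simp [List.getD, List.getElem?_eq_getElem hk1]

-- sum of the per-pair contributions as a closed form in the ≠-count
theorem pv_sum_eq (l : List (Int × Int)) :
    (l.map (fun p => if p.1 = p.2 then (2 : Int) else 1)).sum
    = 2 * (l.length : Int) - (l.countP (fun p => p.1 != p.2) : Int) := by
  induction l with
  | nil => simp
  | cons a t ih =>
    by_cases h : a.1 = a.2 <;>
      simp [h, ih] <;> ring

-- A's accumulation loop as init + a mapped sum
theorem pv_foldl_if_add {c : Int → Prop} [DecidablePred c] (l : List Int) (init : Int) :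
    l.foldl (fun d i => if c i then d + 2 else d + 1) init
    = init + (l.map (fun i => if c i then (2 : Int) else 1)).sum := by
  induction l generalizing init with
  | nil => simp
  | cons a t ih =>
    by_cases h : c a <;> simp [h, ih] <;> ring

theorem pv_calc_dis_closed (arr : List Int) :
    calc_dis arr
    = 2 * ((arr.zip arr.tail).length : Int)
      - ((arr.zip arr.tail).countP (fun p => p.1 != p.2) : Int) := by
  unfold calc_dis
  rw [pv_foldl_if_add]
  have : (PySem.List.pyRange 0 ((arr.length : Int) - 1) 1).map
      (fun i => if PySem.List.pyGetD arr i 0 = PySem.List.pyGetD arr (i + 1) 0 then (2 : Int) else 1)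
      = ((PySem.List.pyRange 0 ((arr.length : Int) - 1) 1).map
          (fun i => (PySem.List.pyGetD arr i 0, PySem.List.pyGetD arr (i + 1) 0))).map
          (fun p => if p.1 = p.2 then (2 : Int) else 1) := by
    rw [List.map_map]; rfl
  rw [this, pv_pairs_eq, pv_sum_eq]
  ring

-- invariant of B's run-head fold: starting from an accumulator whose last
-- element is a (the last element already processed), the fold grows the
-- accumulator by exactly the number of adjacent unequal pairs in a :: t
theorem pv_heads_len (t : List Int) (acc : List Int) (a : Int)
    (hlast : acc.getLast? = some a) :
    (t.foldl (fun hs x => if hs.getLast? = some x then hs else hs ++ [x]) acc).length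
    = acc.length + ((a :: t).zip t).countP (fun p => p.1 != p.2) := by
  induction t generalizing acc a with
  | nil => simp
  | cons b t ih =>
    simp only [List.foldl_cons]
    by_cases h : a = b
    · subst h
      rw [if_pos hlast, ih acc a hlast]
      simp
    · rw [if_neg (by simp [hlast, h]), ih (acc ++ [b]) b (by simp)]
      simp [h]
      omega

-- ===== VERDICT (by name: the statement is the Claim_ definition above) =====
theorem calc_dis_spec : Claim_equal_calc_dis := by
  intro arr _
  unfold Spec_calc_dis calc_dis_alt
  rw [pv_calc_dis_closed]
  split_ifs with h
  · -- len(arr) < 2: A's zip is empty, both sides are 0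
    have : (arr.zip arr.tail).length = 0 := by
      simp [List.length_zip]; omega
    rw [List.length_eq_zero_iff.mp this]
    simp
  · -- len(arr) ≥ 2: heads starts as [x] and grows by the ≠-count
    match arr, h with
    | x :: rest, h =>
      have hheads : ((x :: rest).foldl
          (fun hs x => if hs.getLast? = some x then hs else hs ++ [x]) []).length
          = 1 + ((x :: rest).zip rest).countP (fun p => p.1 != p.2) := by
        simp only [List.foldl_cons]
        have : (if ([] : List Int).getLast? = some x then ([] : List Int) else [] ++ [x]) = [x] := by
          simp
        rw [this, pv_heads_len rest [x] x (by simp)]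
        simp
      simp only [hheads]
      have hzip : ((x :: rest).zip (x :: rest).tail).length = rest.length := by
        simp [List.length_zip]
      rw [show (x :: rest).tail = rest from rfl] at *
      rw [hzip]
      simp only [List.length_cons]
      push_cast
      ring
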